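-- pv_equiv track=rewrite | github.com/rememble/rememble | rememble/ingest/chunker.py | _findCodeFenceRanges
-- ===== SOURCE A (Python) =====
-- def _findCodeFenceRanges(lines: list[str]) -> set[int]:
--     """Return set of line indices inside code fences (never split here)."""
--     inside: set[int] = set()
--     in_fence = False
--     for i, line in enumerate(lines):
--         if line.strip().startswith("```"):
--             if in_fence:
--                 inside.add(i)  # closing fence itself is inside
--                 in_fence = False
--             else:
--                 in_fence = True
--                 inside.add(i)
--         elif in_fence:
--             inside.add(i)
--     return inside
-- ===== SOURCE B (Python) =====
-- def _findCodeFenceRanges(lines: list[str]) -> set[int]: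
--     """Return set of line indices inside code fences (never split here)."""
--     marks = [i for i, line in enumerate(lines) if line.strip().startswith("```")]
--     inside: set[int] = set()
--     for k in range(0, len(marks), 2):
--         o = marks[k]
--         end = marks[k + 1] + 1 if k + 1 < len(marks) else len(lines)
--         inside.update(range(o, end))
--     return inside
-- ===== Notes on version B (the rewrite author's own statement) =====
-- stated objective: alternative
-- what changed: Replaces the single-pass in_fence toggle with a two-phase algorithm: first collect all fence-marker line indices, then pair consecutive markers and add whole index ranges (an unpaired final marker extends to end of file).
import Mathlib
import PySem

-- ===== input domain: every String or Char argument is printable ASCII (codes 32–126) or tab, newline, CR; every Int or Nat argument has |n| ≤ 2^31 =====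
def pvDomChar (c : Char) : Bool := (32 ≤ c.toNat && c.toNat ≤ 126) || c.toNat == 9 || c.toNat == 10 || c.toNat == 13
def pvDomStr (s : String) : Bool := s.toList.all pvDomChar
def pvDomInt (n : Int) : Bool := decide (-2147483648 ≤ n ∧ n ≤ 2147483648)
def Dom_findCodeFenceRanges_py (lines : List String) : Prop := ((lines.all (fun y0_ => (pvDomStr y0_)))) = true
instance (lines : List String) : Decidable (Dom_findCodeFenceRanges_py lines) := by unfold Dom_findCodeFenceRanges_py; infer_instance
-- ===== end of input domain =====

-- B replaces A's single-pass in_fence toggle by collecting all fence-marker indices first and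
-- then pairing consecutive markers into inclusive ranges (an unpaired last marker runs to EOF);
-- same cost, different decomposition (objective: alternative).

-- line.strip().startswith("```")
def pvIsFence (line : String) : Bool :=
  PySem.Str.startswith (PySem.Str.strip line) "```"

-- ===== PORT A =====
-- the for-loop over enumerate(lines) with state (inside, in_fence), index carried explicitly
def pvAGo : List String → Int → PySem.Set Int → Bool → PySem.Set Int
  | [], _, inside, _ => inside
  | l :: ls, i, inside, inF =>
    if pvIsFence l then
      if inF then pvAGo ls (i + 1) (PySem.Set.add inside i) false
      else pvAGo ls (i + 1) (PySem.Set.add inside i) true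
    else if inF then pvAGo ls (i + 1) (PySem.Set.add inside i) true
    else pvAGo ls (i + 1) inside inF

def findCodeFenceRanges_py (lines : List String) : List Int :=
  pvAGo lines 0 PySem.Set.empty false

-- ===== PORT B =====
-- the stride-2 loop over marks: take an opener o and its closer (or EOF), update with the range
def pvBGo : List Int → Int → PySem.Set Int → PySem.Set Int
  | [], _, inside => inside
  | [o], n, inside => PySem.Set.update inside (PySem.List.pyRange o n 1)
  | o :: c :: rest, n, inside =>
    pvBGo rest n (PySem.Set.update inside (PySem.List.pyRange o (c + 1) 1))

def findCodeFenceRanges_py_alt (lines : List String) : List Int :=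
  let marks := ((PySem.List.enumerate lines 0).filter (fun p => pvIsFence p.2)).map (·.1)
  pvBGo marks (lines.length : Int) PySem.Set.empty

-- ===== PRECONDITION & SPEC =====
def Spec_findCodeFenceRanges_py (lines : List String) (out : List Int) : Prop := out = findCodeFenceRanges_py_alt lines
instance (lines : List String) (out : List Int) : Decidable (Spec_findCodeFenceRanges_py lines out) := by unfold Spec_findCodeFenceRanges_py; infer_instance

-- ===== CLAIM (what is proved, stated in full; the proofs are below) =====
def Claim_equal_findCodeFenceRanges_py : Prop := ∀ (lines : List String), Dom_findCodeFenceRanges_py lines → Spec_findCodeFenceRanges_py lines (findCodeFenceRanges_py lines)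

-- ===== LEMMAS AND PROOFS =====

-- pure (set-free) single-pass reference, used as the bridge between the two ports
def pvSpec : List String → Int → Bool → List Int
  | [], _, _ => []
  | l :: ls, i, inF =>
    if pvIsFence l then
      if inF then i :: pvSpec ls (i + 1) false
      else i :: pvSpec ls (i + 1) true
    else if inF then i :: pvSpec ls (i + 1) true
    else pvSpec ls (i + 1) false

lemma pvSpec_cons_false (l : String) (ls : List String) (i : Int) :
    pvSpec (l :: ls) i false =
      if pvIsFence l then i :: pvSpec ls (i + 1) true else pvSpec ls (i + 1) false := by
  simp [pvSpec]

lemma pvSpec_cons_true (l : String) (ls : List String) (i : Int) :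
    pvSpec (l :: ls) i true =
      if pvIsFence l then i :: pvSpec ls (i + 1) false else i :: pvSpec ls (i + 1) true := by
  simp [pvSpec]

-- pure version of pvBGo (concatenated ranges)
def pvBPure : List Int → Int → List Int
  | [], _ => []
  | [o], n => PySem.List.pyRange o n 1
  | o :: c :: rest, n => PySem.List.pyRange o (c + 1) 1 ++ pvBPure rest n

def pvMarks (ls : List String) (i : Int) : List Int :=
  ((PySem.List.enumerate ls i).filter (fun p => pvIsFence p.2)).map (·.1)

lemma pvMarks_nil (i : Int) : pvMarks [] i = [] := rfl

lemma pvMarks_cons (l : String) (ls : List String) (i : Int) :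
    pvMarks (l :: ls) i =
      (if pvIsFence l then [i] else []) ++ pvMarks ls (i + 1) := by
  simp [pvMarks, PySem.List.enumerate_cons, List.filter_cons]
  split <;> simp

lemma pvMarks_bounds (ls : List String) (i : Int) :
    ∀ m ∈ pvMarks ls i, i ≤ m ∧ m < i + ls.length := by
  induction ls generalizing i with
  | nil => simp [pvMarks_nil]
  | cons l ls ih =>
    intro m hm
    rw [pvMarks_cons] at hm
    rcases List.mem_append.mp hm with h | h
    · split at h <;> simp at h
      subst h
      refine ⟨le_refl _, ?_⟩
      simp only [List.length_cons]
      push_cast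
      omega
    · rcases ih (i + 1) m h with ⟨h1, h2⟩
      simp only [List.length_cons]
      push_cast at h2 ⊢
      omega

lemma pvMarks_pairwise (ls : List String) (i : Int) :
    (pvMarks ls i).Pairwise (· < ·) := by
  induction ls generalizing i with
  | nil => simp [pvMarks_nil]
  | cons l ls ih =>
    rw [pvMarks_cons]
    split
    · simp only [List.singleton_append, List.pairwise_cons]
      refine ⟨fun m hm => ?_, ih (i + 1)⟩
      have := (pvMarks_bounds ls (i + 1) m hm).1
      omega
    · simpa using ih (i + 1)

-- A's loop produces acc ++ the pure single-pass result, as long as all of acc is below i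
lemma pvAGo_eq (ls : List String) :
    ∀ (i : Int) (acc : PySem.Set Int) (inF : Bool),
      (∀ x ∈ acc, x < i) → pvAGo ls i acc inF = acc ++ pvSpec ls i inF := by
  induction ls with
  | nil => intro i acc inF _; simp [pvAGo, pvSpec]
  | cons l ls ih =>
    intro i acc inF h
    have hfresh : i ∉ acc := fun hc => absurd (h i hc) (lt_irrefl i)
    have hadd : PySem.Set.add acc i = acc ++ [i] := PySem.Set.add_of_not_mem hfresh
    have h' : ∀ x ∈ acc ++ [i], x < i + 1 := by
      intro x hx
      rcases List.mem_append.mp hx with hx | hx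
      · have := h x hx; omega
      · simp at hx; omega
    have h'' : ∀ x ∈ acc, x < i + 1 := fun x hx => by have := h x hx; omega
    cases inF with
    | true =>
      rw [pvSpec_cons_true]
      simp only [pvAGo, if_true]
      split_ifs with h1
      · rw [hadd, ih (i + 1) _ false h']; simp
      · rw [hadd, ih (i + 1) _ true h']; simp
    | false =>
      rw [pvSpec_cons_false]
      simp only [pvAGo, Bool.false_eq_true, if_false]
      split_ifs with h1
      · rw [hadd, ih (i + 1) _ true h']; simp
      · rw [ih (i + 1) _ false h'']

-- B's loop produces acc ++ the pure ranges, given sorted marks fresh for acc and bounded by n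
lemma pvBGo_eq (marks : List Int) (n : Int) :
    ∀ (acc : PySem.Set Int),
      marks.Pairwise (· < ·) → (∀ m ∈ marks, ∀ x ∈ acc, x < m) → (∀ m ∈ marks, m < n) →
      pvBGo marks n acc = acc ++ pvBPure marks n := by
  induction marks, n using pvBPure.induct with
  | case1 n => intro acc _ _ _; simp [pvBGo, pvBPure]
  | case2 o n =>
    intro acc _ hfresh _
    have hdisj : ∀ x ∈ PySem.List.pyRange o n 1, x ∉ acc := by
      intro x hx hc
      have hox := (PySem.List.mem_pyRange_one.mp hx).1
      have := hfresh o (by simp) x hc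
      omega
    simp only [pvBGo, pvBPure]
    exact PySem.Set.update_eq_append_of_disjoint _ _ (PySem.List.nodup_pyRange_one _ _) hdisj
  | case3 o c rest n ih =>
    intro acc hpw hfresh hbnd
    have hoc : o < c := (List.pairwise_cons.mp hpw).1 c (by simp)
    have hdisj : ∀ x ∈ PySem.List.pyRange o (c + 1) 1, x ∉ acc := by
      intro x hx hc
      have hox := (PySem.List.mem_pyRange_one.mp hx).1
      have := hfresh o (by simp) x hc
      omega
    have hstep : PySem.Set.update acc (PySem.List.pyRange o (c + 1) 1)
        = acc ++ PySem.List.pyRange o (c + 1) 1 :=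
      PySem.Set.update_eq_append_of_disjoint _ _ (PySem.List.nodup_pyRange_one _ _) hdisj
    have hpw' : rest.Pairwise (· < ·) :=
      (List.pairwise_cons.mp (List.pairwise_cons.mp hpw).2).2
    have hcrest : ∀ m ∈ rest, c < m :=
      fun m hm => (List.pairwise_cons.mp (List.pairwise_cons.mp hpw).2).1 m hm
    have hfresh' : ∀ m ∈ rest, ∀ x ∈ acc ++ PySem.List.pyRange o (c + 1) 1, x < m := by
      intro m hm x hx
      rcases List.mem_append.mp hx with hx | hx
      · exact hfresh m (by simp [hm]) x hx
      · have h2 := (PySem.List.mem_pyRange_one.mp hx).2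
        have := hcrest m hm
        omega
    have hbnd' : ∀ m ∈ rest, m < n := fun m hm => hbnd m (by simp [hm])
    simp only [pvBGo, pvBPure]
    rw [hstep, ih _ hpw' hfresh' hbnd']
    simp

-- what an open fence at line i contributes: the range to the closing mark (or to EOF)
def pvBTrue (i : Int) : List Int → Int → List Int
  | [], n => PySem.List.pyRange i n 1
  | c :: rest, n => PySem.List.pyRange i (c + 1) 1 ++ pvBPure rest n

-- the pure single-pass result equals the pure range pairing, mutually for both fence states
lemma pvSpec_eq_bPure (ls : List String) :
    ∀ i : Int,
      (pvSpec ls i false = pvBPure (pvMarks ls i) (i + ls.length)) ∧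
      (pvSpec ls i true = pvBTrue i (pvMarks ls i) (i + ls.length)) := by
  induction ls with
  | nil =>
    intro i
    refine ⟨by simp [pvSpec, pvMarks_nil, pvBPure], ?_⟩
    simp only [pvSpec, pvMarks_nil, pvBTrue, List.length_nil]
    rw [PySem.List.pyRange_one_eq_nil (by omega)]
  | cons l ls ih =>
    intro i
    have hlen : i + ((l :: ls).length : Int) = (i + 1) + ls.length := by
      simp only [List.length_cons]; push_cast; omega
    have hb := pvMarks_bounds ls (i + 1)
    have hlen0 : (0 : Int) ≤ ls.length := Int.natCast_nonneg _
    constructor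
    · rw [pvSpec_cons_false, pvMarks_cons, hlen]
      split_ifs with h1
      · -- fence, opening: A adds i and goes inside; B's first pair starts at i
        rw [(ih (i + 1)).2, List.singleton_append]
        cases hms : pvMarks ls (i + 1) with
        | nil =>
          simp only [pvBPure, pvBTrue]
          rw [PySem.List.pyRange_one_cons (by omega : i < i + 1 + (ls.length : Int))]
        | cons c rest =>
          have hc : i + 1 ≤ c := (hb c (by rw [hms]; simp)).1
          simp only [pvBPure, pvBTrue]
          rw [PySem.List.pyRange_one_cons (by omega : i < c + 1)]
          simp
      · rw [List.nil_append, (ih (i + 1)).1]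
    · rw [pvSpec_cons_true, pvMarks_cons, hlen]
      split_ifs with h1
      · -- fence, closing: B's current range ends exactly at this line
        rw [(ih (i + 1)).1, List.singleton_append]
        simp only [pvBTrue]
        rw [PySem.List.pyRange_one_singleton]
        rfl
      · -- not a fence, still inside: line i joins the current range
        rw [List.nil_append, (ih (i + 1)).2]
        cases hms : pvMarks ls (i + 1) with
        | nil =>
          simp only [pvBTrue]
          rw [PySem.List.pyRange_one_cons (by omega : i < i + 1 + (ls.length : Int))]
        | cons c rest =>
          have hc : i + 1 ≤ c := (hb c (by rw [hms]; simp)).1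
          simp only [pvBTrue]
          rw [PySem.List.pyRange_one_cons (by omega : i < c + 1)]
          simp

-- ===== VERDICT (by name: the statement is the Claim_ definition above) =====
theorem findCodeFenceRanges_py_spec : Claim_equal_findCodeFenceRanges_py := by
  intro lines _
  show findCodeFenceRanges_py lines = findCodeFenceRanges_py_alt lines
  unfold findCodeFenceRanges_py findCodeFenceRanges_py_alt
  have hA := pvAGo_eq lines 0 PySem.Set.empty false (by simp [PySem.Set.empty])
  have hB := pvBGo_eq (pvMarks lines 0) (lines.length : Int) PySem.Set.empty
    (pvMarks_pairwise lines 0)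
    (by intro m _ x hx; simp [PySem.Set.empty] at hx)
    (by intro m hm; have := (pvMarks_bounds lines 0 m hm).2; omega)
  have hS := (pvSpec_eq_bPure lines 0).1
  show pvAGo lines 0 PySem.Set.empty false = pvBGo (pvMarks lines 0) (lines.length : Int) PySem.Set.empty
  rw [hA, hB, hS]
  simp [PySem.Set.empty]
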